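-- pv_equiv track=rewrite | github.com/ngoduythinh250601/Codelearn | All/YasuoQ/YasuoQ.py | steelTempest
-- ===== SOURCE A (Python) =====
-- def steelTempest(ingame):
--     cnt, ans = 0, 0
--     for stt in ingame:
--         if stt == 1:
--             cnt += 1
--         else:
--             ans += (cnt + 1) // 3
--             cnt = 0
--     return ans + cnt // 3
-- ===== SOURCE B (Python) =====
-- def steelTempest(ingame):
--     # Pass 1: run-length encode the sequence into (value, run_length) pairs.
--     runs = []
--     if ingame:
--         cur, n = ingame[0], 1
--         for x in ingame[1:]:
--             if x == cur:
--                 n += 1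
--             else:
--                 runs.append((cur, n))
--                 cur, n = x, 1
--         runs.append((cur, n))
--     # Pass 2: each run of 1s contributes (n+1)//3, except a trailing run of 1s: n//3.
--     total = 0
--     last = len(runs) - 1
--     for i, (k, n) in enumerate(runs):
--         if k == 1:
--             total += n // 3 if i == last else (n + 1) // 3
--     return total
-- ===== Notes on version B (the rewrite author's own statement) =====
-- stated objective: alternative
-- what changed: Replaces the inline running counter/accumulator loop by an explicit run-length encoding pass followed by a sum over runs of 1s (with the trailing run contributing n//3 instead of (n+1)//3, as A does).
import Mathlib
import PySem

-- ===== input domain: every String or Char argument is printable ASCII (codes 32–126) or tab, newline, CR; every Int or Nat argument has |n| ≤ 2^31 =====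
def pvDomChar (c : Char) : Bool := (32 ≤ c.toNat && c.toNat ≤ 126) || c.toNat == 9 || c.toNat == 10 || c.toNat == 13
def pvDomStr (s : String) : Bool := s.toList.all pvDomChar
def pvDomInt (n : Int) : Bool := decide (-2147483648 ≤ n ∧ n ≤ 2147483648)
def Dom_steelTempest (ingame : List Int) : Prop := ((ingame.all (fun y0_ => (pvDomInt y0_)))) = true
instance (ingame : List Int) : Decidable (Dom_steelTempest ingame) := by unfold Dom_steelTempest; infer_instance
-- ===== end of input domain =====

-- B re-implements A via an explicit run-length encoding pass plus a sum over runs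
-- of 1s (trailing run n//3, earlier runs (n+1)//3); same O(n) cost, different structure.

-- ===== PORT A =====
-- the for-loop over `ingame` with state (cnt, ans); exact, Python // = floordiv
def steelTempestLoop (cnt ans : Int) : List Int → Int
  | [] => ans + PySem.Int.floordiv cnt 3
  | stt :: rest =>
    if stt = 1 then steelTempestLoop (cnt + 1) ans rest
    else steelTempestLoop 0 (ans + PySem.Int.floordiv (cnt + 1) 3) rest

def steelTempest (ingame : List Int) : Int := steelTempestLoop 0 0 ingame

-- ===== PORT B =====
-- pass 1 of Source B: run-length encoding, carrying the pending run (cur, n)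
def pvRleAux (cur n : Int) : List Int → List (Int × Int)
  | [] => [(cur, n)]
  | x :: xs => if x = cur then pvRleAux cur (n + 1) xs else (cur, n) :: pvRleAux x 1 xs

-- pass 2 of Source B: sum over runs; the last run of 1s contributes n//3, others (n+1)//3
def pvSumRuns : List (Int × Int) → Int
  | [] => 0
  | [(k, n)] => if k = 1 then PySem.Int.floordiv n 3 else 0
  | (k, n) :: r :: rs =>
    (if k = 1 then PySem.Int.floordiv (n + 1) 3 else 0) + pvSumRuns (r :: rs)

def steelTempest_alt : List Int → Int
  | [] => 0
  | x :: xs => pvSumRuns (pvRleAux x 1 xs)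

-- ===== PRECONDITION & SPEC =====
def Spec_steelTempest (ingame : List Int) (out : Int) : Prop := out = steelTempest_alt ingame
instance (ingame : List Int) (out : Int) : Decidable (Spec_steelTempest ingame out) := by unfold Spec_steelTempest; infer_instance

-- ===== CLAIM (what is proved, stated in full; the proofs are below) =====
def Claim_equal_steelTempest : Prop := ∀ (ingame : List Int), Dom_steelTempest ingame → Spec_steelTempest ingame (steelTempest ingame)

-- ===== LEMMAS AND PROOFS =====

-- A's loop with the accumulator stripped: value contributed by the rest of the list
-- when the current run of 1s already has length c.
def pvG (c : Int) : List Int → Int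
  | [] => PySem.Int.floordiv c 3
  | x :: xs =>
    if x = 1 then pvG (c + 1) xs
    else PySem.Int.floordiv (c + 1) 3 + pvG 0 xs

theorem pvLoop_eq_g (xs : List Int) : ∀ c a : Int,
    steelTempestLoop c a xs = a + pvG c xs := by
  induction xs with
  | nil => intro c a; simp [steelTempestLoop, pvG]
  | cons x xs ih =>
    intro c a
    by_cases hx : x = 1 <;>
      simp [steelTempestLoop, pvG, hx, ih]; ring

theorem pvRleAux_ne_nil (xs : List Int) : ∀ cur n : Int, pvRleAux cur n xs ≠ [] := by
  induction xs with
  | nil => intro cur n; simp [pvRleAux]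
  | cons x xs ih =>
    intro cur n
    by_cases h : x = cur <;> simp [pvRleAux, h, ih]

theorem pvSumRuns_cons (k n : Int) (rest : List (Int × Int)) (h : rest ≠ []) :
    pvSumRuns ((k, n) :: rest)
      = (if k = 1 then PySem.Int.floordiv (n + 1) 3 else 0) + pvSumRuns rest := by
  cases rest with
  | nil => exact absurd rfl h
  | cons r rs => rfl

theorem pvRle_sum (xs : List Int) : ∀ x n : Int,
    pvSumRuns (pvRleAux x n xs)
      = if x = 1 then pvG n xs else pvG 0 xs := by
  induction xs with
  | nil =>
    intro x n
    by_cases hx : x = 1 <;> simp [pvRleAux, pvSumRuns, pvG, hx]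
  | cons y ys ih =>
    intro x n
    by_cases hyx : y = x
    · subst hyx
      rw [show pvRleAux y n (y :: ys) = pvRleAux y (n + 1) ys by simp [pvRleAux]]
      rw [ih y (n + 1)]
      by_cases hy : y = 1
      · simp [hy, pvG]
      · simp [hy, pvG]
    · rw [show pvRleAux x n (y :: ys) = (x, n) :: pvRleAux y 1 ys by simp [pvRleAux, hyx]]
      rw [pvSumRuns_cons _ _ _ (pvRleAux_ne_nil ys y 1), ih y 1]
      by_cases hx : x = 1
      · have hy : ¬ y = 1 := by rw [hx] at hyx; exact hyx
        simp [hx, hy, pvG]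
      · by_cases hy : y = 1 <;> simp [hx, hy, pvG]

theorem pvMain (ingame : List Int) : steelTempest ingame = steelTempest_alt ingame := by
  cases ingame with
  | nil => simp [steelTempest, steelTempestLoop, steelTempest_alt]
  | cons x xs =>
    by_cases hx : x = 1
    · simp [steelTempest, steelTempestLoop, steelTempest_alt, hx,
        pvLoop_eq_g, pvRle_sum]
    · simp [steelTempest, steelTempestLoop, steelTempest_alt, hx,
        pvLoop_eq_g, pvRle_sum]

-- ===== VERDICT (by name: the statement is the Claim_ definition above) =====
theorem steelTempest_spec : Claim_equal_steelTempest := by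
  intro ingame _
  unfold Spec_steelTempest
  exact pvMain ingame
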